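-- pv_equiv track=rewrite | github.com/yexpp/glosario-quality-checker-and-github-activity-dashboard | Quality_Assessment/glossary_checker.py | check_slug_order
-- ===== SOURCE A (Python) =====
-- def iter_valid_entries(glossary):
--     """
--     Yield glossary entries that are dictionaries containing a 'slug' key.
--
--     Args:
--         glossary (list): List of glossary entries (dicts).
--
--     Yields:
--         dict: Valid entry with a 'slug' key.
--     """
--     for entry in glossary:
--         if isinstance(entry, dict) and 'slug' in entry:
--             yield entry
--
-- def check_slug_order(glossary, slug_lines=None):
--     """
--     Check whether slugs, in file line order, are sorted alphabetically.
--
--     Args: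
--         glossary: Glossary entries to check.
--         slug_lines: Optional dict mapping slugs to line numbers.
--
--     Returns:
--         List of slugs with ordering issues.
--     """
--     issues = []
--     slug_lines = slug_lines or {}
--
--     valid_entries = list(iter_valid_entries(glossary))
--
--     valid_entries = sorted(valid_entries, key=lambda e: slug_lines.get(e['slug'], 999999))
--     slugs_file_order = [entry['slug'] for entry in valid_entries]
--
--
--     slugs_alpha_order = sorted(slugs_file_order)
--     slug_to_alpha_index = {slug: i for i, slug in enumerate(slugs_alpha_order)}
--
--     reported_slugs = set()
--
--     for i, slug in enumerate(slugs_file_order):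
--         alpha_pos = slug_to_alpha_index[slug]
--         for later_slug in slugs_file_order[i+1:]:
--             if slug_to_alpha_index[later_slug] < alpha_pos:
--                 if later_slug not in reported_slugs:
--                     line_num = slug_lines.get(later_slug, 'unknown line number')
--                     issues.append(f"Slug'{later_slug}' (line {line_num}) is out of order.")
--                     reported_slugs.add(later_slug)
--
--     return issues
-- ===== SOURCE B (Python) =====
-- def check_slug_order(glossary, slug_lines=None):
--     """
--     Check whether slugs, in file line order, are sorted alphabetically.
--
--     Re-implementation: after sorting, a single two-pointer sweep
--     computes for every distinct slug the first file position whose slug is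
--     alphabetically greater ("first offending index"); one pass over the file
--     then drops each out-of-order slug into the bucket of its first offending
--     index, which reproduces the original discovery order.
--     """
--     lines = slug_lines or {}
--     valid = [e for e in glossary if isinstance(e, dict) and 'slug' in e]
--     valid = sorted(valid, key=lambda e: lines.get(e['slug'], 999999))
--     order = [e['slug'] for e in valid]
--     n = len(order)
--     rank = {s: r for r, s in enumerate(sorted(order))}
--     ranks = [rank[s] for s in order]
--     # first[s] = first index whose rank exceeds rank[s] (two-pointer sweep:
--     # ranks of sorted(set(order)) increase, so p only ever moves forward)
--     first = {}
--     p = 0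
--     for s in sorted(set(order)):
--         r = rank[s]
--         while p < n and ranks[p] <= r:
--             p += 1
--         first[s] = p
--     buckets = [[] for _ in range(n)]
--     done = set()
--     for j, s in enumerate(order):
--         i = first[s]
--         if i < j and s not in done:
--             buckets[i].append("Slug'{}' (line {}) is out of order.".format(
--                 s, lines.get(s, 'unknown line number')))
--             done.add(s)
--     return [m for b in buckets for m in b]
-- ===== Notes on version B (the rewrite author's own statement) =====
-- stated objective: alternative
-- what changed: Replaces A's scan of all later slugs for every position (with a reported-set) by a two-pointer sweep over the rank-sorted distinct slugs that computes each slug's first offending index, followed by a single bucket pass over the file that reproduces A's discovery order.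
import Mathlib
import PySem

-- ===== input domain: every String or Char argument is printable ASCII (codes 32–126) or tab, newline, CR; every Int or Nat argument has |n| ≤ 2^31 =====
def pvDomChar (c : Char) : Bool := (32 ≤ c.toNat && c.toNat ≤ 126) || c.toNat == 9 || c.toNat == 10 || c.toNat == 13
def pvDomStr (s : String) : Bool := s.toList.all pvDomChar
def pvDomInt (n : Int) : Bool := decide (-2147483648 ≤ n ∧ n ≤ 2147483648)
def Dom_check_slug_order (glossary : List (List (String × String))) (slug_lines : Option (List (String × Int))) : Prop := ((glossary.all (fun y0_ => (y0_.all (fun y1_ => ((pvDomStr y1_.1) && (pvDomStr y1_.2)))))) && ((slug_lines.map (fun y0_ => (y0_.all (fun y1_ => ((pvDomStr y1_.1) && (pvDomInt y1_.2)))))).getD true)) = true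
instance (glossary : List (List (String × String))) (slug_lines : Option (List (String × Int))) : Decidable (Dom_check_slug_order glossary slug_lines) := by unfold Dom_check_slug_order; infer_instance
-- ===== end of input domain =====

-- B replaces A's scan-all-later-slugs loop with a sorted two-pointer sweep plus one bucket
-- pass that reproduces A's discovery order (objective: alternative algorithm).

-- ===== PORT A =====

def pvAmsg (lines : PySem.Dict String Int) (l : String) : String :=
  "Slug'" ++ l ++ "' (line " ++
    (match lines.get? l with
      | some n => PySem.Int.toStr n
      | none => "unknown line number") ++ ") is out of order."

def pvAslug (e : List (String × String)) : String :=
  ((PySem.Dict.mk e).get? "slug").getD ""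

def check_slug_order (glossary : List (List (String × String))) (slug_lines : Option (List (String × Int))) : List String :=
  let lines : PySem.Dict String Int := PySem.Dict.mk (slug_lines.getD [])
  let valid := glossary.filter (fun e => (PySem.Dict.mk e).contains "slug")
  let valid := PySem.List.sorted valid (fun e => lines.getD (pvAslug e) 999999)
  let order := valid.map pvAslug
  let a2i := (PySem.List.enumerate (PySem.List.sorted order (fun s => s))).foldl
      (fun d p => d.insert p.2 p.1) PySem.Dict.empty
  ((PySem.List.enumerate order).foldl
    (fun (st : List String × PySem.Set String) p =>
      let alpha_pos := (a2i.get? p.2).getD 0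
      (PySem.List.slice order (some (p.1 + 1)) none).foldl
        (fun st later =>
          if (a2i.get? later).getD 0 < alpha_pos then
            if later ∈ st.2 then st
            else (st.1 ++ [pvAmsg lines later], st.2.add later)
          else st) st)
    ([], ([] : PySem.Set String))).1


-- ===== PORT B =====
def pvBmsg (lines : PySem.Dict String Int) (l : String) : String :=
  "Slug'" ++ l ++ "' (line " ++
    (match lines.get? l with
      | some n => PySem.Int.toStr n
      | none => "unknown line number") ++ ") is out of order."

def pvBslug (e : List (String × String)) : String :=
  ((PySem.Dict.mk e).get? "slug").getD ""

def pvBadv (ranks : List Int) (r : Int) (p : Nat) : Nat :=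
  if h : p < ranks.length then
    (if ranks.getD p 0 ≤ r then pvBadv ranks r (p + 1) else p)
  else p
termination_by ranks.length - p

def check_slug_order_alt (glossary : List (List (String × String))) (slug_lines : Option (List (String × Int))) : List String :=
  let lines : PySem.Dict String Int := PySem.Dict.mk (slug_lines.getD [])
  let valid := glossary.filter (fun e => (PySem.Dict.mk e).contains "slug")
  let valid := PySem.List.sorted valid (fun e => lines.getD (pvBslug e) 999999)
  let order := valid.map pvBslug
  let n := order.length
  let rank := (PySem.List.enumerate (PySem.List.sorted order (fun s => s))).foldl
      (fun d p => d.insert p.2 p.1) PySem.Dict.empty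
  let ranks := order.map (fun s => rank.getD s 0)
  let first := ((PySem.List.sorted (PySem.Set.ofList order) (fun s => s)).foldl
      (fun (st : PySem.Dict String Nat × Nat) s =>
        let p := pvBadv ranks (rank.getD s 0) st.2
        (st.1.insert s p, p))
      (PySem.Dict.empty, 0)).1
  let scan := (PySem.List.enumerate order).foldl
      (fun (st : List (List String) × PySem.Set String) p =>
        let i := first.getD p.2 0
        if (i : Int) < p.1 ∧ p.2 ∉ st.2 then
          (PySem.List.pySetD st.1 (i : Int)
              (PySem.List.pyGetD st.1 (i : Int) [] ++ [pvBmsg lines p.2]),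
            st.2.add p.2)
        else st)
      (List.replicate n [], ([] : PySem.Set String))
  scan.1.flatten


-- ===== PRECONDITION & SPEC =====
def Spec_check_slug_order (glossary : List (List (String × String))) (slug_lines : Option (List (String × Int))) (out : List String) : Prop := out = check_slug_order_alt glossary slug_lines
instance (glossary : List (List (String × String))) (slug_lines : Option (List (String × Int))) (out : List String) : Decidable (Spec_check_slug_order glossary slug_lines out) := by unfold Spec_check_slug_order; infer_instance

-- ===== CLAIM (what is proved, stated in full; the proofs are below) =====
def Claim_equal_check_slug_order : Prop := ∀ (glossary : List (List (String × String))) (slug_lines : Option (List (String × Int))), Dom_check_slug_order glossary slug_lines → Spec_check_slug_order glossary slug_lines (check_slug_order glossary slug_lines)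

-- ===== LEMMAS AND PROOFS =====

-- enumerate of a singleton
theorem pv_enum_singleton (x : String) (s : Int) :
    PySem.List.enumerate [x] s = [(s, x)] := rfl

-- value stored for s by the {slug: i for i, slug in enumerate(l)} loop: the LAST index of s in l
def pvLastIdx (l : List String) (s : String) : Nat := l.length - 1 - List.idxOf s l.reverse

theorem pv_a2i_get?_mem (l : List String) (start : Int) (d : PySem.Dict String Int) (s : String)
    (h : s ∈ l) :
    ((PySem.List.enumerate l start).foldl (fun d p => d.insert p.2 p.1) d).get? s
      = some (start + (pvLastIdx l s : Int)) := by
  induction l using List.reverseRecOn generalizing d with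
  | nil => simp at h
  | append_singleton l x ih =>
    rw [PySem.List.enumerate_append, List.foldl_append]
    simp only [pv_enum_singleton, List.foldl_cons, List.foldl_nil]
    rw [PySem.Dict.get?_insert]
    by_cases hsx : s = x
    · subst hsx
      rw [if_pos rfl]
      have : pvLastIdx (l ++ [s]) s = l.length := by
        simp only [pvLastIdx, List.reverse_append, List.reverse_singleton,
          List.singleton_append, List.idxOf_cons_self, List.length_append,
          List.length_singleton]
        omega
      rw [this]
    · simp only [if_neg hsx]
      have hsl : s ∈ l := by
        rcases List.mem_append.mp h with h' | h'
        · exact h'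
        · simp at h'; exact absurd h' hsx
      rw [ih _ hsl]
      have hrw : pvLastIdx (l ++ [x]) s = pvLastIdx l s := by
        have hk : List.idxOf s l.reverse < l.length := by
          have := List.idxOf_lt_length_of_mem (List.mem_reverse.mpr hsl)
          simpa using this
        simp only [pvLastIdx, List.reverse_append, List.reverse_singleton,
          List.singleton_append, List.length_append, List.length_singleton]
        rw [List.idxOf_cons_ne _ (fun he => hsx he.symm)]
        omega
      rw [hrw]

theorem pv_lastIdx_mono (l : List String) (hpw : l.Pairwise (· ≤ ·)) (s t : String)
    (hs : s ∈ l) (ht : t ∈ l) (hst : s < t) : pvLastIdx l s < pvLastIdx l t := by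
  have hrev : l.reverse.Pairwise (fun a b => b ≤ a) := List.pairwise_reverse.mpr hpw
  have hks : List.idxOf s l.reverse < l.reverse.length :=
    List.idxOf_lt_length_of_mem (by simpa using hs)
  have hkt : List.idxOf t l.reverse < l.reverse.length :=
    List.idxOf_lt_length_of_mem (by simpa using ht)
  have hes : l.reverse[List.idxOf s l.reverse] = s := List.getElem_idxOf hks
  have het : l.reverse[List.idxOf t l.reverse] = t := List.getElem_idxOf hkt
  have hlt : List.idxOf t l.reverse < List.idxOf s l.reverse := by
    rcases Nat.lt_trichotomy (List.idxOf t l.reverse) (List.idxOf s l.reverse) with h | h | h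
    · exact h
    · exfalso
      have het' : l.reverse[List.idxOf s l.reverse] = t := by
        simpa only [h] using het
      exact absurd (hes.symm.trans het') (ne_of_lt hst)
    · have := (List.pairwise_iff_getElem.mp hrev) _ _ hks hkt h
      rw [hes, het] at this
      exact absurd hst (not_lt.mpr this)
  simp only [pvLastIdx]
  simp at hks hkt
  omega

-- ===== rank-comparison bridge =====
def pvA2I (xs : List String) : PySem.Dict String Int :=
  (PySem.List.enumerate (PySem.List.sorted xs (fun s => s))).foldl
    (fun d p => d.insert p.2 p.1) PySem.Dict.empty

def pvR (xs : List String) (s : String) : Int := ((pvA2I xs).get? s).getD 0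

theorem pvR_eq (xs : List String) (s : String) (hs : s ∈ xs) :
    pvR xs s = (pvLastIdx (PySem.List.sorted xs (fun u => u)) s : Int) := by
  have hmem : s ∈ PySem.List.sorted xs (fun u => u) :=
    (PySem.List.mem_sorted xs _ false s).mpr hs
  simp [pvR, pvA2I, pv_a2i_get?_mem _ _ _ _ hmem]

theorem pvR_lt_iff (xs : List String) (s t : String) (hs : s ∈ xs) (ht : t ∈ xs) :
    (pvR xs s < pvR xs t) ↔ s < t := by
  have hpw : (PySem.List.sorted xs (fun u => u)).Pairwise (· ≤ ·) := by
    simpa using PySem.List.sorted_pairwise xs (fun u => u)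
  have hms : s ∈ PySem.List.sorted xs (fun u => u) := (PySem.List.mem_sorted xs _ false s).mpr hs
  have hmt : t ∈ PySem.List.sorted xs (fun u => u) := (PySem.List.mem_sorted xs _ false t).mpr ht
  rw [pvR_eq xs s hs, pvR_eq xs t ht]
  constructor
  · intro h
    rcases lt_trichotomy s t with h' | h' | h'
    · exact h'
    · subst h'; omega
    · exact absurd (pv_lastIdx_mono _ hpw t s hmt hms h') (by omega)
  · intro h'
    exact_mod_cast pv_lastIdx_mono _ hpw s t hms hmt h'

theorem pvR_le_iff (xs : List String) (s t : String) (hs : s ∈ xs) (ht : t ∈ xs) :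
    (pvR xs s ≤ pvR xs t) ↔ s ≤ t := by
  rw [← not_lt, pvR_lt_iff xs t s ht hs, not_lt]

-- ===== the dedup loop =====
def pvNew : List String → PySem.Set String → List String
  | [], _ => []
  | t :: l, S => if t ∈ S then pvNew l S else t :: pvNew l (S.add t)

theorem pv_add_of_mem (S : PySem.Set String) (t : String) (h : t ∈ S) : S.add t = S := by
  have hc : S.contains t = true := by
    rw [PySem.Set.contains_eq_listContains]
    simpa using h
  simp only [PySem.Set.add, hc, if_true]

theorem pv_fold_dedup (f : String → String) (l : List String) (acc : List String)
    (S : PySem.Set String) :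
    l.foldl (fun (st : List String × PySem.Set String) t =>
        if t ∈ st.2 then st else (st.1 ++ [f t], st.2.add t)) (acc, S)
      = (acc ++ (pvNew l S).map f, l.foldl (fun S t => S.add t) S) := by
  induction l generalizing acc S with
  | nil => simp [pvNew]
  | cons t l ih =>
    simp only [List.foldl_cons]
    by_cases h : t ∈ S
    · rw [if_pos h]
      rw [ih acc S]
      simp [pvNew, h]
    · rw [if_neg h]
      rw [ih]
      simp [pvNew, h]

theorem pvNew_append (a b : List String) (S : PySem.Set String) :
    pvNew (a ++ b) S = pvNew a S ++ pvNew b (a.foldl (fun S t => S.add t) S) := by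
  induction a generalizing S with
  | nil => simp [pvNew]
  | cons t a ih =>
    simp only [List.cons_append, pvNew, List.foldl_cons]
    by_cases h : t ∈ S
    · rw [if_pos h, if_pos h, ih, pv_add_of_mem S t h]
    · rw [if_neg h, if_neg h, ih]
      simp

-- ===== canonical description =====
def pvIth (xs : List String) (i : Nat) : String := xs.getD i ""

def pvPtr (xs : List String) (s : String) : Nat := List.findIdx (fun t => decide (s < t)) xs

def pvSeg (xs : List String) (i j : Nat) : List String := (xs.take j).drop (i+1)

def pvCi (xs : List String) (i : Nat) : List String :=
  (xs.zipIdx.filter (fun p =>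
      decide (pvPtr xs p.1 = i) && decide (i < p.2) && !(decide (p.1 ∈ pvSeg xs i p.2)))).map
    (fun p => p.1)

def pvCanon (xs : List String) : List String := (List.range xs.length).flatMap (pvCi xs)

-- pvNew over a filtered list, with positions made explicit
theorem pv_new_filter (q : String → Bool) (l : List String) (k : Nat) (S : PySem.Set String) :
    pvNew (l.filter q) S
      = ((l.zipIdx k).filter (fun p =>
            q p.1 && !(decide (p.1 ∈ S)) && !(decide (p.1 ∈ (l.take (p.2 - k)).filter q)))).map
          (fun p => p.1) := by
  induction l generalizing k S with
  | nil => rfl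
  | cons t l ih =>
    rw [List.zipIdx_cons]
    -- rewrite the tail condition once and for all, in each case below
    by_cases hqt : q t
    · rw [List.filter_cons_of_pos hqt]
      by_cases hts : t ∈ S
      · -- in S already: head contributes nothing on either side
        have hR : ((t, k) :: l.zipIdx (k+1)).filter (fun p =>
              q p.1 && !(decide (p.1 ∈ S)) && !(decide (p.1 ∈ ((t :: l).take (p.2 - k)).filter q)))
            = (l.zipIdx (k+1)).filter (fun p =>
              q p.1 && !(decide (p.1 ∈ S)) && !(decide (p.1 ∈ ((t :: l).take (p.2 - k)).filter q))) :=
          List.filter_cons_of_neg (by simp [hts])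
        rw [hR]
        simp only [pvNew, if_pos hts]
        rw [ih (k+1) S]
        refine congrArg (List.map (fun p : String × Nat => p.1)) (List.filter_congr ?_)
        intro p hp
        have hk1 : k + 1 ≤ p.2 :=
          ((List.mem_zipIdx (x := p.1) (i := p.2) (by simpa using hp))).1
        have htake : (t :: l).take (p.2 - k) = t :: l.take (p.2 - (k+1)) := by
          have h2 : p.2 - k = (p.2 - (k+1)) + 1 := by omega
          rw [h2, List.take_succ_cons]
        rw [htake, List.filter_cons_of_pos hqt]
        by_cases hpt : p.1 = t
        · simp [hpt, hts]
        · simp [List.mem_cons, hpt]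
      · -- fresh head: kept on both sides
        have hR : ((t, k) :: l.zipIdx (k+1)).filter (fun p =>
              q p.1 && !(decide (p.1 ∈ S)) && !(decide (p.1 ∈ ((t :: l).take (p.2 - k)).filter q)))
            = (t, k) :: (l.zipIdx (k+1)).filter (fun p =>
              q p.1 && !(decide (p.1 ∈ S)) && !(decide (p.1 ∈ ((t :: l).take (p.2 - k)).filter q))) :=
          List.filter_cons_of_pos (by simp [hqt, hts])
        rw [hR]
        simp only [pvNew, if_neg hts]
        rw [ih (k+1) (S.add t)]
        simp only [List.map_cons]
        congr 1
        refine congrArg (List.map (fun p : String × Nat => p.1)) (List.filter_congr ?_)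
        intro p hp
        have hk1 : k + 1 ≤ p.2 :=
          ((List.mem_zipIdx (x := p.1) (i := p.2) (by simpa using hp))).1
        have htake : (t :: l).take (p.2 - k) = t :: l.take (p.2 - (k+1)) := by
          have h2 : p.2 - k = (p.2 - (k+1)) + 1 := by omega
          rw [h2, List.take_succ_cons]
        rw [htake, List.filter_cons_of_pos hqt]
        by_cases hpt : p.1 = t
        · simp [hpt, hts]
        · simp [List.mem_cons, hpt, PySem.Set.mem_add]
    · -- head fails q: invisible on both sides
      rw [List.filter_cons_of_neg (by simp [hqt])]
      have hR : ((t, k) :: l.zipIdx (k+1)).filter (fun p =>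
            q p.1 && !(decide (p.1 ∈ S)) && !(decide (p.1 ∈ ((t :: l).take (p.2 - k)).filter q)))
          = (l.zipIdx (k+1)).filter (fun p =>
            q p.1 && !(decide (p.1 ∈ S)) && !(decide (p.1 ∈ ((t :: l).take (p.2 - k)).filter q))) :=
        List.filter_cons_of_neg (by simp [hqt])
      rw [hR]
      rw [ih (k+1) S]
      refine congrArg (List.map (fun p : String × Nat => p.1)) (List.filter_congr ?_)
      intro p hp
      have hk1 : k + 1 ≤ p.2 :=
        ((List.mem_zipIdx (x := p.1) (i := p.2) (by simpa using hp))).1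
      have htake : (t :: l).take (p.2 - k) = t :: l.take (p.2 - (k+1)) := by
        have h2 : p.2 - k = (p.2 - (k+1)) + 1 := by omega
        rw [h2, List.take_succ_cons]
      rw [htake, List.filter_cons_of_neg (by simp [hqt])]

-- membership in a middle segment, by index
theorem pv_mem_seg (xs : List String) (i j : Nat) (s : String) :
    s ∈ pvSeg xs i j ↔ ∃ k, i < k ∧ k < j ∧ ∃ (hk : k < xs.length), xs[k] = s := by
  simp only [pvSeg, List.drop_take]
  constructor
  · intro h
    rw [List.mem_iff_getElem] at h
    obtain ⟨m, hm, hval⟩ := h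
    have hlen : m < j - (i+1) ∧ i + 1 + m < xs.length := by
      have := hm
      simp [List.length_take, List.length_drop] at this
      omega
    refine ⟨i + 1 + m, by omega, by omega, by omega, ?_⟩
    rw [← hval]
    rw [List.getElem_take, List.getElem_drop]
  · rintro ⟨k, hik, hkj, hk, hval⟩
    rw [List.mem_iff_getElem]
    refine ⟨k - (i+1), by simp [List.length_take, List.length_drop]; omega, ?_⟩
    rw [List.getElem_take, List.getElem_drop]
    have : i + 1 + (k - (i + 1)) = k := by omega
    simp [this, hval]

-- ===== A-side: batches and their dedup =====
def pvBatch (xs : List String) (i : Nat) : List String :=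
  (xs.drop (i+1)).filter (fun t => decide (t < pvIth xs i))

def pvSetE (xs : List String) (i : Nat) : PySem.Set String :=
  ((List.range i).flatMap (pvBatch xs)).foldl (fun S t => S.add t) []

theorem pv_new_flat (xs : List String) (m : Nat) :
    pvNew ((List.range m).flatMap (pvBatch xs)) []
      = (List.range m).flatMap (fun i => pvNew (pvBatch xs i) (pvSetE xs i)) := by
  induction m with
  | zero => rfl
  | succ m ih =>
    rw [List.range_succ, List.flatMap_append, List.flatMap_append, pvNew_append, ih]
    simp only [List.flatMap_cons, List.flatMap_nil, List.append_nil]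
    rfl

theorem pv_mem_setE (xs : List String) (i : Nat) (u : String) :
    u ∈ pvSetE xs i ↔ ∃ i' < i, u ∈ pvBatch xs i' := by
  unfold pvSetE
  rw [show (fun (S : PySem.Set String) (t : String) => S.add t)
        = (fun (S : PySem.Set String) (t : String) => S.add (id t)) from rfl]
  rw [PySem.Set.mem_foldl_add]
  simp [List.mem_flatMap]

theorem pv_getD_eq_getElem' (xs : List String) (i : Nat) (h : i < xs.length) :
    pvIth xs i = xs[i] := by
  simp [pvIth, List.getD_eq_getElem?_getD, List.getElem?_eq_getElem h]

theorem pv_mem_drop_of_getElem (xs : List String) (k j : Nat) (hj : j < xs.length)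
    (hkj : k ≤ j) : xs[j] ∈ xs.drop k := by
  rw [List.mem_iff_getElem]
  refine ⟨j - k, by simp [List.length_drop]; omega, ?_⟩
  rw [List.getElem_drop]
  congr 1
  omega

theorem pv_batch_dedup (xs : List String) (i : Nat) (hi : i < xs.length) :
    pvNew (pvBatch xs i) (pvSetE xs i) = pvCi xs i := by
  unfold pvBatch
  rw [pv_new_filter _ _ (i+1) _]
  unfold pvCi
  -- split the full zipIdx at position i+1
  have hsplit : xs.zipIdx = (xs.take (i+1)).zipIdx ++ (xs.drop (i+1)).zipIdx (i+1) := by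
    conv_lhs => rw [← List.take_append_drop (i+1) xs]
    rw [List.zipIdx_append]
    congr 2
    simp [List.length_take]
    omega
  rw [hsplit, List.filter_append]
  have hnil : (xs.take (i+1)).zipIdx.filter (fun p =>
      decide (pvPtr xs p.1 = i) && decide (i < p.2) && !(decide (p.1 ∈ pvSeg xs i p.2))) = [] := by
    rw [List.filter_eq_nil_iff]
    intro p hp
    have hlt : p.2 < i + 1 := by
      have := (List.mem_zipIdx (x := p.1) (i := p.2) (by simpa using hp)).2.1
      have hl : (xs.take (i+1)).length ≤ i + 1 := by simp [List.length_take]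
      omega
    simp only [Bool.and_eq_true, decide_eq_true_eq, Bool.not_eq_true', not_and]
    intro _ h2
    omega
  rw [hnil, List.nil_append]
  congr 1
  apply List.filter_congr
  intro p hp
  obtain ⟨hk1, hk2, hval⟩ := List.mem_zipIdx (x := p.1) (i := p.2) (by simpa using hp)
  have hj : p.2 < xs.length := by
    have hld : (xs.drop (i+1)).length = xs.length - (i+1) := by simp
    omega
  have hvx : p.1 = xs[p.2] := by
    rw [hval, List.getElem_drop]
    congr 1
    omega
  have hij : i < p.2 := by omega
  -- the prefix list is exactly the segment
  have hseg : (xs.drop (i+1)).take (p.2 - (i+1)) = pvSeg xs i p.2 := by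
    rw [pvSeg, List.drop_take]
  -- membership in the reported-before set
  have hsetE : p.1 ∈ pvSetE xs i ↔ ∃ i' < i, p.1 < pvIth xs i' := by
    rw [pv_mem_setE]
    constructor
    · rintro ⟨i', hi', hmem⟩
      rw [pvBatch, List.mem_filter] at hmem
      exact ⟨i', hi', by simpa using hmem.2⟩
    · rintro ⟨i', hi', hlt⟩
      refine ⟨i', hi', ?_⟩
      rw [pvBatch, List.mem_filter]
      refine ⟨?_, by simpa using hlt⟩
      rw [hvx]
      exact pv_mem_drop_of_getElem xs (i'+1) p.2 hj (by omega)
  -- findIdx characterization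
  have hptr : pvPtr xs p.1 = i ↔ (p.1 < pvIth xs i ∧ ∀ i' < i, ¬ p.1 < pvIth xs i') := by
    rw [pvPtr, List.findIdx_eq hi]
    constructor
    · rintro ⟨h1, h2⟩
      refine ⟨by rw [pv_getD_eq_getElem' xs i hi]; simpa using h1, ?_⟩
      intro i' hi' hc
      have := h2 i' hi'
      rw [pv_getD_eq_getElem' xs i' (by omega)] at hc
      simp [hc] at this
    · rintro ⟨h1, h2⟩
      refine ⟨by rw [pv_getD_eq_getElem' xs i hi] at h1; simpa using h1, ?_⟩
      intro j hji
      have := h2 j hji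
      rw [pv_getD_eq_getElem' xs j (by omega)] at this
      simpa using this
  -- now the boolean equality
  rw [Bool.eq_iff_iff]
  simp only [Bool.and_eq_true, decide_eq_true_eq, Bool.not_eq_true', decide_eq_false_iff_not,
    List.mem_filter, hseg]
  constructor
  · rintro ⟨⟨hlt, hnot⟩, hpre⟩
    have hfa : ∀ i' < i, ¬ p.1 < pvIth xs i' := by
      intro i' hi' hc
      exact hnot (hsetE.mpr ⟨i', hi', hc⟩)
    refine ⟨⟨hptr.mpr ⟨hlt, hfa⟩, hij⟩, ?_⟩
    intro hm
    exact hpre ⟨hm, hlt⟩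
  · rintro ⟨⟨hp1, _⟩, hns⟩
    obtain ⟨h1, h2⟩ := hptr.mp hp1
    refine ⟨⟨h1, ?_⟩, ?_⟩
    · intro hc
      obtain ⟨i', hi', hlt'⟩ := hsetE.mp hc
      exact h2 i' hi' hlt'
    · intro hm
      exact hns hm.1

-- ===== A-side assembly =====
theorem pv_inner_eq (lines : PySem.Dict String Int) (a2i : PySem.Dict String Int) (r : Int)
    (ys : List String) (st : List String × PySem.Set String) :
    ys.foldl (fun st later =>
        if (a2i.get? later).getD 0 < r then
          if later ∈ st.2 then st
          else (st.1 ++ [pvAmsg lines later], st.2.add later)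
        else st) st
      = (ys.filter (fun later => decide ((a2i.get? later).getD 0 < r))).foldl
          (fun st later =>
            if later ∈ st.2 then st
            else (st.1 ++ [pvAmsg lines later], st.2.add later)) st := by
  induction ys generalizing st with
  | nil => rfl
  | cons y ys ih =>
    by_cases hc : (a2i.get? y).getD 0 < r
    · rw [List.filter_cons_of_pos (by simpa using hc)]
      simp only [List.foldl_cons]
      rw [if_pos hc]
      exact ih _
    · rw [List.filter_cons_of_neg (by simpa using hc)]
      simp only [List.foldl_cons]
      rw [if_neg hc]
      exact ih _

theorem pv_stream_eq (xs : List String) :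
    xs.zipIdx.flatMap (fun p =>
        (PySem.List.slice xs (some ((0:Int) + (p.2:Int) + 1)) none).filter
          (fun t => decide (((pvA2I xs).get? t).getD 0 < ((pvA2I xs).get? p.1).getD 0)))
      = (List.range xs.length).flatMap (pvBatch xs) := by
  have h1 : xs.zipIdx.flatMap (fun p =>
        (PySem.List.slice xs (some ((0:Int) + (p.2:Int) + 1)) none).filter
          (fun t => decide (((pvA2I xs).get? t).getD 0 < ((pvA2I xs).get? p.1).getD 0)))
      = xs.zipIdx.flatMap (fun p => pvBatch xs p.2) := by
    apply List.flatMap_congr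
    intro p hp
    obtain ⟨hk1, hk2, hval⟩ := List.mem_zipIdx (x := p.1) (i := p.2) (by simpa using hp)
    have hj : p.2 < xs.length := by omega
    have hval' : p.1 = xs[p.2] := by simpa using hval
    have hslice : PySem.List.slice xs (some ((0:Int) + (p.2:Int) + 1)) none = xs.drop (p.2+1) := by
      have hs := PySem.List.slice_from (a := (0:Int) + (p.2:Int) + 1) xs (by omega)
      rw [hs]
      congr 1
      omega
    rw [hslice, pvBatch]
    apply List.filter_congr
    intro t ht
    have htx : t ∈ xs := List.mem_of_mem_drop ht
    have hpx : p.1 ∈ xs := by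
      rw [hval']
      exact List.getElem_mem _
    rw [Bool.eq_iff_iff]
    simp only [decide_eq_true_eq]
    show pvR xs t < pvR xs p.1 ↔ t < pvIth xs p.2
    rw [pvR_lt_iff xs t p.1 htx hpx, pv_getD_eq_getElem' xs p.2 hj, ← hval']
  rw [h1]
  have h2 : xs.zipIdx.flatMap (fun p => pvBatch xs p.2)
      = (xs.zipIdx.map (fun p => p.2)).flatMap (pvBatch xs) := by
    rw [List.flatMap_map]
  rw [h2]
  congr 1
  simp [List.range_eq_range']

theorem pv_A_char (lines : PySem.Dict String Int) (xs : List String) :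
    ((PySem.List.enumerate xs).foldl
      (fun (st : List String × PySem.Set String) p =>
        (PySem.List.slice xs (some (p.1 + 1)) none).foldl
          (fun st later =>
            if ((pvA2I xs).get? later).getD 0 < ((pvA2I xs).get? p.2).getD 0 then
              if later ∈ st.2 then st
              else (st.1 ++ [pvAmsg lines later], st.2.add later)
            else st) st)
      ([], ([] : PySem.Set String))).1
    = (pvCanon xs).map (pvAmsg lines) := by
  have hfeq : (fun (st : List String × PySem.Set String) (p : Int × String) =>
      (PySem.List.slice xs (some (p.1 + 1)) none).foldl
        (fun st later =>
          if ((pvA2I xs).get? later).getD 0 < ((pvA2I xs).get? p.2).getD 0 then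
            if later ∈ st.2 then st
            else (st.1 ++ [pvAmsg lines later], st.2.add later)
          else st) st)
    = (fun (st : List String × PySem.Set String) (p : Int × String) =>
      ((PySem.List.slice xs (some (p.1 + 1)) none).filter
          (fun later => decide (((pvA2I xs).get? later).getD 0 < ((pvA2I xs).get? p.2).getD 0))).foldl
        (fun st later =>
          if later ∈ st.2 then st
          else (st.1 ++ [pvAmsg lines later], st.2.add later)) st) := by
    funext st p
    exact pv_inner_eq lines (pvA2I xs) _ _ st
  rw [hfeq]
  rw [← List.foldl_flatMap]
  rw [pv_fold_dedup]
  simp only [List.nil_append]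
  congr 1
  rw [PySem.List.enumerate_eq_zipIdx_map, List.flatMap_map]
  have hstream := pv_stream_eq xs
  rw [show (fun (p : String × Nat) =>
        (PySem.List.slice xs (some ((0:Int) + (p.2:Int) + 1)) none).filter
          (fun t => decide (((pvA2I xs).get? t).getD 0 < ((pvA2I xs).get? p.1).getD 0)))
      = (fun (p : String × Nat) =>
        (PySem.List.slice xs (some (((0:Int) + (p.2:Int)) + 1)) none).filter
          (fun t => decide (((pvA2I xs).get? t).getD 0 < ((pvA2I xs).get? p.1).getD 0))) from rfl] at hstream
  rw [hstream]
  rw [pv_new_flat]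
  unfold pvCanon
  apply List.flatMap_congr
  intro i hi
  exact pv_batch_dedup xs i (List.mem_range.mp hi)

def pvLinesOf (slug_lines : Option (List (String × Int))) : PySem.Dict String Int :=
  PySem.Dict.mk (slug_lines.getD [])

def pvOrderOf (glossary : List (List (String × String)))
    (slug_lines : Option (List (String × Int))) : List String :=
  (PySem.List.sorted (glossary.filter (fun e => (PySem.Dict.mk e).contains "slug"))
      (fun e => (pvLinesOf slug_lines).getD (pvAslug e) 999999)).map pvAslug

theorem pv_A_final (glossary : List (List (String × String)))
    (slug_lines : Option (List (String × Int))) :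
    check_slug_order glossary slug_lines
      = (pvCanon (pvOrderOf glossary slug_lines)).map (pvAmsg (pvLinesOf slug_lines)) := by
  unfold check_slug_order
  exact pv_A_char _ _

-- ===== B-side: the two-pointer sweep =====
theorem pv_findIdx_congr {α : Type} (p q : α → Bool) (l : List α)
    (h : ∀ x ∈ l, p x = q x) : l.findIdx p = l.findIdx q := by
  induction l with
  | nil => rfl
  | cons a l ih =>
    rw [List.findIdx_cons, List.findIdx_cons, h a (by simp)]
    rw [ih (fun x hx => h x (by simp [hx]))]

theorem pv_adv_spec (ranks : List Int) (r : Int) (p : Nat) (hp : p ≤ ranks.length)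
    (h : ∀ q, q < p → ∀ _ : q < ranks.length, ranks.getD q 0 ≤ r) :
    pvBadv ranks r p = ranks.findIdx (fun v => !decide (v ≤ r)) := by
  fun_induction pvBadv ranks r p with
  | case1 p hlt hle ih =>
    exact ih (by omega) (fun q hq hq' => by
      rcases Nat.lt_or_ge q p with h' | h'
      · exact h q h' hq'
      · have : q = p := by omega
        subst this
        exact hle)
  | case2 p hlt hle =>
    symm
    rw [List.findIdx_eq hlt]
    constructor
    · rw [← List.getD_eq_getElem ranks 0 hlt]
      simp only [Bool.not_eq_eq_eq_not, Bool.not_true, decide_eq_false_iff_not]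
      exact hle
    · intro j hj
      have := h j (by omega) (by omega)
      rw [List.getD_eq_getElem ranks 0 (by omega)] at this
      simp [this]
  | case3 p hge =>
    have hpl : p = ranks.length := by omega
    subst hpl
    symm
    rw [List.findIdx_eq_length]
    intro x hx
    obtain ⟨j, hj, hval⟩ := List.mem_iff_getElem.mp hx
    have := h j (by omega) hj
    rw [List.getD_eq_getElem ranks 0 hj] at this
    rw [← hval]
    simp [this]

-- ranks list: value at an in-range index
theorem pv_ranks_getD (xs : List String) (q : Nat) (hq : q < xs.length) :
    ((xs.map (fun s => pvR xs s)).getD q 0) = pvR xs (xs[q]) := by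
  rw [List.getD_eq_getElem _ 0 (by simpa using hq)]
  simp

-- the pointer target, in string terms
theorem pv_adv_to_ptr (xs : List String) (s : String) (hs : s ∈ xs) (p0 : Nat)
    (hp : p0 ≤ xs.length)
    (h : ∀ q, q < p0 → ∀ _ : q < xs.length, xs[q] ≤ s) :
    pvBadv (xs.map (fun u => pvR xs u)) (pvR xs s) p0 = pvPtr xs s := by
  rw [pv_adv_spec _ _ _ (by simpa using hp)]
  · rw [List.findIdx_map]
    rw [pv_findIdx_congr _ (fun t => decide (s < t)) xs]
    · rfl
    · intro t htx
      simp only [Function.comp]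
      rw [Bool.eq_iff_iff]
      simp only [Bool.not_eq_eq_eq_not, Bool.not_true, decide_eq_false_iff_not,
        decide_eq_true_eq]
      rw [pvR_le_iff xs t s htx hs]
      exact ⟨fun h' => not_le.mp h', fun h' => not_le.mpr h'⟩
  · intro q hq hq'
    have hq2 : q < xs.length := by simpa using hq'
    rw [pv_ranks_getD xs q hq2]
    rw [pvR_le_iff xs _ s (List.getElem_mem _) hs]
    exact h q hq hq2

-- frame: folding the insert loop over keys not containing k leaves k's binding alone
theorem pv_first_frame (xs : List String) (L : List String) (d : PySem.Dict String Nat)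
    (p0 : Nat) (k : String) (hk : k ∉ L) :
    ((L.foldl (fun (st : PySem.Dict String Nat × Nat) s =>
        (st.1.insert s (pvBadv (xs.map (fun u => pvR xs u)) (pvR xs s) st.2),
          pvBadv (xs.map (fun u => pvR xs u)) (pvR xs s) st.2)) (d, p0)).1).get? k
      = d.get? k := by
  induction L generalizing d p0 with
  | nil => rfl
  | cons s L ih =>
    simp only [List.foldl_cons]
    rw [ih _ _ (fun h => hk (by simp [h]))]
    rw [PySem.Dict.get?_insert]
    rw [if_neg (fun h => hk (by simp [h]))]

theorem pv_first_inv (xs : List String) (L : List String) (d : PySem.Dict String Nat) (p0 : Nat)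
    (hpw : L.Pairwise (· < ·)) (hmem : ∀ s ∈ L, s ∈ xs) (hp : p0 ≤ xs.length)
    (hinv : ∀ s' ∈ L, ∀ q, q < p0 → ∀ _ : q < xs.length, xs[q] ≤ s') :
    ∀ s ∈ L, ((L.foldl (fun (st : PySem.Dict String Nat × Nat) s =>
        (st.1.insert s (pvBadv (xs.map (fun u => pvR xs u)) (pvR xs s) st.2),
          pvBadv (xs.map (fun u => pvR xs u)) (pvR xs s) st.2)) (d, p0)).1).get? s
      = some (pvPtr xs s) := by
  induction L generalizing d p0 with
  | nil => intro s hs; simp at hs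
  | cons s0 L ih =>
    have hs0x : s0 ∈ xs := hmem s0 (by simp)
    have hadv : pvBadv (xs.map (fun u => pvR xs u)) (pvR xs s0) p0 = pvPtr xs s0 :=
      pv_adv_to_ptr xs s0 hs0x p0 hp (fun q hq hq' => hinv s0 (by simp) q hq hq')
    have hptrle : pvPtr xs s0 ≤ xs.length := List.findIdx_le_length
    intro s hs
    simp only [List.foldl_cons, hadv]
    rcases List.mem_cons.mp hs with hseq | hstail
    · subst hseq
      rw [pv_first_frame xs L _ _ s (by
        intro hc
        exact lt_irrefl s ((List.pairwise_cons.mp hpw).1 s hc))]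
      rw [PySem.Dict.get?_insert, if_pos rfl]
    · refine ih _ _ (hpw.of_cons) (fun u hu => hmem u (by simp [hu])) hptrle ?_ s hstail
      intro s' hs' q hq hq'
      have hq2 : ¬ (s0 < xs[q]) := by
        have := List.not_of_lt_findIdx (p := fun t => decide (s0 < t)) (xs := xs) (by
          show q < pvPtr xs s0
          exact hq)
        simpa using this
      have hlt : s0 < s' := (List.pairwise_cons.mp hpw).1 s' hs'
      have : xs[q] ≤ s0 := not_lt.mp hq2
      exact le_trans this (le_of_lt hlt)

-- ===== B-side: the bucket scan =====
theorem pv_set_map_range (n : Nat) (f : Nat → List String) (i0 : Nat) (v : List String) :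
    ((List.range n).map f).set i0 v = (List.range n).map (fun k => if k = i0 then v else f k) := by
  apply List.ext_getElem
  · simp
  · intro j h1 h2
    simp only [List.getElem_set, List.getElem_map, List.getElem_range]
    by_cases hji : i0 = j
    · subst hji; simp
    · rw [if_neg hji, if_neg (Ne.symm hji)]

theorem pv_mem_done (F : String → Nat) (l : List (Int × String)) (u : String) :
    u ∈ (l.filter (fun p => decide (((F p.2 : Nat) : Int) < p.1))).foldl
        (fun S p => PySem.Set.add S p.2) ([] : PySem.Set String)
      ↔ ∃ q ∈ l, ((F q.2 : Int) < q.1) ∧ u = q.2 := by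
  rw [PySem.Set.mem_foldl_add (l.filter (fun p => decide (((F p.2 : Nat) : Int) < p.1)))
    (fun p : Int × String => p.2) ([] : PySem.Set String) u]
  simp only [List.mem_filter, decide_eq_true_eq]
  constructor
  · rintro (h | ⟨b, ⟨hm, ht⟩, hu⟩)
    · simp at h
    · exact ⟨b, hm, ht, hu⟩
  · rintro ⟨b, hm, ht, hu⟩
    exact Or.inr ⟨b, ⟨hm, ht⟩, hu⟩

theorem pv_scan_inv (xs : List String) (lines : PySem.Dict String Int) (F : String → Nat)
    (l : List (Int × String)) (hsub : ∀ p ∈ l, p ∈ PySem.List.enumerate xs)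
    (hpw : l.Pairwise (fun p q => p.1 < q.1)) :
    l.foldl (fun (st : List (List String) × PySem.Set String) p =>
        if ((F p.2 : Int) < p.1 ∧ p.2 ∉ st.2) then
          (PySem.List.pySetD st.1 ((F p.2 : Nat) : Int)
              (PySem.List.pyGetD st.1 ((F p.2 : Nat) : Int) [] ++ [pvBmsg lines p.2]),
            st.2.add p.2)
        else st)
      ((List.range xs.length).map (fun _ => ([] : List String)), ([] : PySem.Set String))
    = ((List.range xs.length).map (fun i =>
          (l.filter (fun p => decide (F p.2 = i) && decide ((i : Int) < p.1) &&
              decide (∀ q ∈ l, (q.2 = p.2 ∧ ((F p.2 : Nat) : Int) < q.1) → p.1 ≤ q.1))).map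
            (fun p => pvBmsg lines p.2)),
        (l.filter (fun p => decide (((F p.2 : Nat) : Int) < p.1))).foldl
          (fun S p => PySem.Set.add S p.2) ([] : PySem.Set String)) := by
  induction l using List.reverseRecOn with
  | nil => simp
  | append_singleton l p0 ih =>
    have hsub' : ∀ p ∈ l, p ∈ PySem.List.enumerate xs :=
      fun p hp => hsub p (List.mem_append_left _ hp)
    have hpw' : l.Pairwise (fun p q => p.1 < q.1) :=
      hpw.sublist (List.sublist_append_left _ _)
    have hgt : ∀ p ∈ l, p.1 < p0.1 := by
      intro p hp
      exact (List.pairwise_append.mp hpw).2.2 p hp p0 (by simp)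
    obtain ⟨k, hk, hp0⟩ := (PySem.List.mem_enumerate_iff xs 0 p0).mp (hsub p0 (by simp))
    have hp01 : p0.1 = (k : Int) := by rw [hp0]; simp
    have hp0n : p0.1 < (xs.length : Int) := by rw [hp01]; exact_mod_cast hk
    rw [List.foldl_append, ih hsub' hpw']
    simp only [List.foldl_cons, List.foldl_nil]
    -- the l-part of the new filters agrees with the old ones
    have hfl : ∀ i : Nat, l.filter (fun p => decide (F p.2 = i) && decide ((i : Int) < p.1) &&
          decide (∀ q ∈ l ++ [p0], (q.2 = p.2 ∧ ((F p.2 : Nat) : Int) < q.1) → p.1 ≤ q.1))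
        = l.filter (fun p => decide (F p.2 = i) && decide ((i : Int) < p.1) &&
          decide (∀ q ∈ l, (q.2 = p.2 ∧ ((F p.2 : Nat) : Int) < q.1) → p.1 ≤ q.1)) := by
      intro i
      apply List.filter_congr
      intro p hp
      have h3 : (∀ q ∈ l ++ [p0], (q.2 = p.2 ∧ ((F p.2 : Nat) : Int) < q.1) → p.1 ≤ q.1)
          ↔ (∀ q ∈ l, (q.2 = p.2 ∧ ((F p.2 : Nat) : Int) < q.1) → p.1 ≤ q.1) := by
        constructor
        · intro h q hq hc
          exact h q (List.mem_append_left _ hq) hc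
        · intro h q hq hc
          rcases List.mem_append.mp hq with hql | hq0
          · exact h q hql hc
          · have : q = p0 := by simpa using hq0
            subst this
            exact le_of_lt (hgt p hp)
      rw [Bool.eq_iff_iff]
      simp only [Bool.and_eq_true, decide_eq_true_eq, h3]
    by_cases htrig : ((F p0.2 : Int) < p0.1 ∧ p0.2 ∉
        (l.filter (fun p => decide (((F p.2 : Nat) : Int) < p.1))).foldl
          (fun S p => PySem.Set.add S p.2) ([] : PySem.Set String))
    · rw [if_pos htrig]
      have hi0n : F p0.2 < xs.length := by
        have h1 : (F p0.2 : Int) < (xs.length : Int) := lt_trans htrig.1 hp0n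
        exact_mod_cast h1
      have hthird : ∀ q ∈ l ++ [p0], (q.2 = p0.2 ∧ ((F p0.2 : Nat) : Int) < q.1) → p0.1 ≤ q.1 := by
        intro q hq hc
        rcases List.mem_append.mp hq with hql | hq0
        · exfalso
          apply htrig.2
          rw [pv_mem_done]
          refine ⟨q, hql, ?_, hc.1.symm⟩
          rw [hc.1]
          exact hc.2
        · have : q = p0 := by simpa using hq0
          subst this
          exact le_refl _
      simp only [Prod.mk.injEq]
      constructor
      · -- buckets
        rw [PySem.List.pySetD_natCast, PySem.List.pyGetD_natCast,
          PySem.List.getD_map_range _ _ _ _ hi0n, pv_set_map_range]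
        apply List.map_congr_left
        intro i hi
        rw [List.filter_append, hfl i]
        by_cases hieq : i = F p0.2
        · subst hieq
          rw [if_pos rfl]
          have hp0keep : List.filter (fun p => decide (F p.2 = F p0.2) &&
              decide ((F p0.2 : Int) < p.1) &&
              decide (∀ q ∈ l ++ [p0], (q.2 = p.2 ∧ ((F p.2 : Nat) : Int) < q.1) → p.1 ≤ q.1))
              [p0] = [p0] := by
            simp [htrig.1]
            intro a b hab hb ha
            refine hthird (a, b) ?_ ⟨hb, ha⟩
            rcases hab with h | h
            · exact List.mem_append_left _ h
            · simp [h]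
          rw [hp0keep, List.map_append]
          rfl
        · rw [if_neg hieq]
          have hp0drop : List.filter (fun p => decide (F p.2 = i) && decide ((i : Int) < p.1) &&
              decide (∀ q ∈ l ++ [p0], (q.2 = p.2 ∧ ((F p.2 : Nat) : Int) < q.1) → p.1 ≤ q.1))
              [p0] = [] := by
            simp
            intro h
            exact (hieq h.symm).elim
          rw [hp0drop, List.append_nil]
      · -- reported set
        rw [List.filter_append]
        have hone : List.filter (fun p => decide (((F p.2 : Nat) : Int) < p.1)) [p0] = [p0] := by
          simp [htrig.1]
        rw [hone, List.foldl_append]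
        simp only [List.foldl_cons, List.foldl_nil]
    · rw [if_neg htrig]
      simp only [Prod.mk.injEq]
      constructor
      · -- buckets unchanged
        apply List.map_congr_left
        intro i hi
        rw [List.filter_append, hfl i]
        have hp0drop : List.filter (fun p => decide (F p.2 = i) && decide ((i : Int) < p.1) &&
            decide (∀ q ∈ l ++ [p0], (q.2 = p.2 ∧ ((F p.2 : Nat) : Int) < q.1) → p.1 ≤ q.1))
            [p0] = [] := by
          by_cases hieq : F p0.2 = i
          · rcases not_and_or.mp htrig with hna | hnb
            · simp only [← hieq]
              simp [hna]
            · have hmem := not_not.mp hnb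
              obtain ⟨q, hql, hqt, hqe⟩ := (pv_mem_done F l p0.2).mp hmem
              have hnall : ¬ (∀ q' ∈ l ++ [p0], (q'.2 = p0.2 ∧ ((F p0.2 : Nat) : Int) < q'.1) →
                  p0.1 ≤ q'.1) := by
                intro hall
                have hFq : F p0.2 = F q.2 := by rw [hqe]
                have := hall q (List.mem_append_left _ hql) ⟨hqe.symm, by rw [hFq]; exact hqt⟩
                have := hgt q hql
                omega
              simp
              refine fun _ _ => ⟨q.1, Or.inl ?_, ?_, hgt q hql⟩
              · rw [hqe]
                simpa using hql
              · have hFq : F p0.2 = F q.2 := by rw [hqe]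
                rw [hFq]
                exact hqt
          · simp [fun h : F p0.2 = i => hieq h]
        rw [hp0drop, List.append_nil]
      · -- reported set unchanged
        rw [List.filter_append]
        by_cases hc1 : (F p0.2 : Int) < p0.1
        · have hmem : p0.2 ∈ (l.filter (fun p => decide (((F p.2 : Nat) : Int) < p.1))).foldl
              (fun S p => PySem.Set.add S p.2) ([] : PySem.Set String) := by
            rcases not_and_or.mp htrig with hna | hnb
            · exact absurd hc1 hna
            · exact not_not.mp hnb
          have hone : List.filter (fun p => decide (((F p.2 : Nat) : Int) < p.1)) [p0] = [p0] := by
            simp [hc1]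
          rw [hone, List.foldl_append]
          simp only [List.foldl_cons, List.foldl_nil]
          rw [pv_add_of_mem _ _ hmem]
        · have hnone : List.filter (fun p => decide (((F p.2 : Nat) : Int) < p.1)) [p0] = [] := by
            simp [hc1]
          rw [hnone, List.append_nil]

-- ===== B-side: buckets agree with the canonical groups =====
theorem pv_bucket_eq_ci (xs : List String) (lines : PySem.Dict String Int) (F : String → Nat)
    (hF : ∀ s ∈ xs, F s = pvPtr xs s) (i : Nat) :
    ((PySem.List.enumerate xs).filter (fun p => decide (F p.2 = i) && decide ((i : Int) < p.1) &&
          decide (∀ q ∈ PySem.List.enumerate xs,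
            (q.2 = p.2 ∧ ((F p.2 : Nat) : Int) < q.1) → p.1 ≤ q.1))).map
        (fun p => pvBmsg lines p.2)
      = (pvCi xs i).map (pvBmsg lines) := by
  rw [PySem.List.enumerate_eq_zipIdx_map xs 0, List.filter_map, List.map_map]
  unfold pvCi
  rw [List.map_map]
  congr 1
  apply List.filter_congr
  intro p hp
  obtain ⟨hk1, hk2, hval⟩ := List.mem_zipIdx (x := p.1) (i := p.2) (by simpa using hp)
  have hj : p.2 < xs.length := by omega
  have hval' : p.1 = xs[p.2] := by simpa using hval
  have hpx : p.1 ∈ xs := by rw [hval']; exact List.getElem_mem _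
  have hFp : F p.1 = pvPtr xs p.1 := hF p.1 hpx
  rw [Bool.eq_iff_iff]
  simp only [Function.comp, Bool.and_eq_true, decide_eq_true_eq, Bool.not_eq_true',
    decide_eq_false_iff_not]
  constructor
  · rintro ⟨⟨h1, h2⟩, h3⟩
    have hij : i < p.2 := by
      have : (i : Int) < 0 + (p.2 : Int) := h2
      omega
    refine ⟨⟨by rw [← hFp]; exact h1, hij⟩, ?_⟩
    intro hseg
    obtain ⟨k', hik', hk'j, hk'n, hk'val⟩ := (pv_mem_seg xs i p.2 p.1).mp hseg
    have hq : ((0 : Int) + (k' : Int), xs[k']) ∈ PySem.List.enumerate xs := by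
      rw [PySem.List.mem_enumerate_iff]
      exact ⟨k', hk'n, rfl⟩
    rw [PySem.List.enumerate_eq_zipIdx_map xs 0] at hq
    have hle := h3 _ hq ⟨by simpa using hk'val, by
      show ((F p.1 : Nat) : Int) < 0 + (k' : Int)
      rw [h1]
      omega⟩
    have : (0 : Int) + (p.2 : Int) ≤ 0 + (k' : Int) := hle
    omega
  · rintro ⟨⟨h1, h2⟩, hseg⟩
    refine ⟨⟨by rw [hFp]; exact h1, by show (i : Int) < 0 + (p.2 : Int); omega⟩, ?_⟩
    intro q hq hc
    rw [← PySem.List.enumerate_eq_zipIdx_map xs 0] at hq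
    obtain ⟨k', hk'n, hqval⟩ := (PySem.List.mem_enumerate_iff xs 0 q).mp hq
    have hq1 : q.1 = (k' : Int) := by rw [hqval]; simp
    have hq2 : q.2 = xs[k'] := by rw [hqval]
    have hik' : i < k' := by
      have : ((F p.1 : Nat) : Int) < q.1 := hc.2
      rw [hFp, h1] at this
      rw [hq1] at this
      exact_mod_cast this
    rcases Nat.lt_or_ge k' p.2 with hlt | hge
    · exfalso
      apply hseg
      rw [pv_mem_seg]
      refine ⟨k', hik', hlt, hk'n, ?_⟩
      rw [← hq2, hc.1]
    · show (0 : Int) + (p.2 : Int) ≤ q.1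
      rw [hq1]
      omega

-- ===== B-side final characterization =====
theorem pv_B_char (lines : PySem.Dict String Int) (xs : List String) :
    (((PySem.List.enumerate xs).foldl
        (fun (st : List (List String) × PySem.Set String) p =>
          let i := (((PySem.List.sorted (PySem.Set.ofList xs) (fun s => s)).foldl
              (fun (st : PySem.Dict String Nat × Nat) s =>
                let q := pvBadv
                  (xs.map (fun s =>
                    ((PySem.List.enumerate (PySem.List.sorted xs (fun s => s))).foldl
                      (fun d p => d.insert p.2 p.1) PySem.Dict.empty).getD s 0))
                  (((PySem.List.enumerate (PySem.List.sorted xs (fun s => s))).foldl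
                      (fun d p => d.insert p.2 p.1) PySem.Dict.empty).getD s 0) st.2
                (st.1.insert s q, q))
              (PySem.Dict.empty, 0)).1).getD p.2 0
          if (i : Int) < p.1 ∧ p.2 ∉ st.2 then
            (PySem.List.pySetD st.1 (i : Int)
                (PySem.List.pyGetD st.1 (i : Int) [] ++ [pvBmsg lines p.2]),
              st.2.add p.2)
          else st)
        (List.replicate xs.length [], ([] : PySem.Set String))).1).flatten
      = (pvCanon xs).map (pvBmsg lines) := by
  have hgetD : ∀ s : String,
      ((PySem.List.enumerate (PySem.List.sorted xs (fun s => s))).foldl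
        (fun d p => d.insert p.2 p.1) PySem.Dict.empty).getD s 0 = pvR xs s := by
    intro s
    rw [PySem.Dict.getD_eq_get?_getD]
    rfl
  simp only [hgetD]
  have hF : ∀ s ∈ xs,
      (((PySem.List.sorted (PySem.Set.ofList xs) (fun s => s)).foldl
          (fun (st : PySem.Dict String Nat × Nat) s =>
            (st.1.insert s (pvBadv (xs.map (fun s => pvR xs s)) (pvR xs s) st.2),
              pvBadv (xs.map (fun s => pvR xs s)) (pvR xs s) st.2))
          (PySem.Dict.empty, 0)).1).getD s 0 = pvPtr xs s := by
    intro s hs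
    have hL : s ∈ PySem.List.sorted (PySem.Set.ofList xs) (fun s => s) :=
      (PySem.List.mem_sorted _ _ false s).mpr ((PySem.Set.mem_ofList xs s).mpr hs)
    have h := pv_first_inv xs (PySem.List.sorted (PySem.Set.ofList xs) (fun s => s))
      PySem.Dict.empty 0 (PySem.List.sorted_ofList_pairwise_lt xs)
      (fun u hu => (PySem.Set.mem_ofList xs u).mp ((PySem.List.mem_sorted _ _ false u).mp hu))
      (Nat.zero_le _)
      (fun s' _ q hq _ => absurd hq (Nat.not_lt_zero q)) s hL
    rw [PySem.Dict.getD_eq_get?_getD, h]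
    rfl
  rw [show (List.replicate xs.length ([] : List String))
      = (List.range xs.length).map (fun _ => ([] : List String)) from by
    rw [List.map_const', List.length_range]]
  rw [pv_scan_inv xs lines
    (fun s => (((PySem.List.sorted (PySem.Set.ofList xs) (fun s => s)).foldl
        (fun (st : PySem.Dict String Nat × Nat) s =>
          (st.1.insert s (pvBadv (xs.map (fun s => pvR xs s)) (pvR xs s) st.2),
            pvBadv (xs.map (fun s => pvR xs s)) (pvR xs s) st.2))
        (PySem.Dict.empty, 0)).1).getD s 0)
    (PySem.List.enumerate xs) (fun p hp => hp) (PySem.List.pairwise_lt_enumerate xs 0)]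
  rw [List.map_congr_left (fun i _ => pv_bucket_eq_ci xs lines _ hF i)]
  rw [pvCanon, List.map_flatMap, List.flatMap_def]

theorem pv_B_final (glossary : List (List (String × String)))
    (slug_lines : Option (List (String × Int))) :
    check_slug_order_alt glossary slug_lines
      = (pvCanon (pvOrderOf glossary slug_lines)).map (pvBmsg (pvLinesOf slug_lines)) := by
  unfold check_slug_order_alt
  exact pv_B_char _ _

theorem pv_AB (glossary : List (List (String × String)))
    (slug_lines : Option (List (String × Int))) :
    check_slug_order glossary slug_lines = check_slug_order_alt glossary slug_lines := by
  rw [pv_A_final, pv_B_final]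
  rfl

-- ===== VERDICT (by name: the statement is the Claim_ definition above) =====
theorem check_slug_order_spec : Claim_equal_check_slug_order := by
  intro glossary slug_lines _
  unfold Spec_check_slug_order
  exact pv_AB glossary slug_lines
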